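-- pv_equiv track=rewrite | github.com/dhia619/Q-Learning-Flappy-Bird | src/q-learn.py | state_to_index
-- ===== SOURCE A (Python) =====
-- def state_to_index(state):
--     bins = state[:-1]  # The first five elements
--     bird_status = state[-1]  # The last element
--
--     # Calculate the index for the first 5 states
--     index = 0
--     for i in range(len(bins)):
--         index += bins[i] * (10 ** i)  # Each bin has 10 options
--
--     # Adjust index for bird status
--     index = index * 2 + bird_status  # Multiply by 2 to account for bird status
--
--     return index
-- ===== SOURCE B (Python) =====
-- def state_to_index(state):
--     # Horner's method over the reversed bins instead of summing bins[i]*10**i.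
--     index = 0
--     for b in reversed(state[:-1]):
--         index = index * 10 + b
--     return index * 2 + state[-1]
-- ===== Notes on version B (the rewrite author's own statement) =====
-- stated objective: faster
-- what changed: Replaces the explicit powers-of-ten sum (index += bins[i]*10**i over range(len(bins))) by Horner's multiply-accumulate over the reversed bins list, so no 10**i big-integer power is ever recomputed.
import Mathlib
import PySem

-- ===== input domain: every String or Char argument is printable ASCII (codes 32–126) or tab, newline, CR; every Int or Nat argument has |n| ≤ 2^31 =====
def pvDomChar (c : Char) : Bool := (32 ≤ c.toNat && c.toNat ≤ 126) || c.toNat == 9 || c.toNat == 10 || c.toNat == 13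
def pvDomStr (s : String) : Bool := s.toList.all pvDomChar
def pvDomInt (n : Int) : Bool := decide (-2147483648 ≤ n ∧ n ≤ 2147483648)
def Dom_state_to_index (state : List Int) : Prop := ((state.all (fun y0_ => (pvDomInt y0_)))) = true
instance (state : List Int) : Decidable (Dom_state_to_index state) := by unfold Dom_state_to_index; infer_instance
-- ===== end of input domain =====

-- B evaluates the same mixed-radix value by Horner's method over the reversed bins,
-- avoiding A's recomputation of each power of ten; equivalence on non-empty states.

-- ===== PORT A =====
def state_to_index (state : List Int) : Int :=
  let bins := PySem.List.slice state none (some (-1))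
  let bird_status := PySem.List.pyGetD state (-1) 0
  let index := (PySem.List.pyRange 0 bins.length 1).foldl
    (fun idx i => idx + PySem.List.pyGetD bins i 0 * 10 ^ i.toNat) 0
  index * 2 + bird_status

-- ===== PORT B =====
def state_to_index_alt (state : List Int) : Int :=
  let index := (PySem.List.slice state none (some (-1))).reverse.foldl
    (fun acc b => acc * 10 + b) 0
  index * 2 + PySem.List.pyGetD state (-1) 0

-- ===== PRECONDITION & SPEC =====
-- Pre_ excludes only the empty list, on which both A and B raise IndexError when taking the last element.
def Pre_state_to_index (state : List Int) : Prop := state ≠ []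
instance (state : List Int) : Decidable (Pre_state_to_index state) := by unfold Pre_state_to_index; infer_instance
def pvWitness_state_to_index : List Int := [3, 1, 4, 1, 5, 1]

def Spec_state_to_index (state : List Int) (out : Int) : Prop := out = state_to_index_alt state
instance (state : List Int) (out : Int) : Decidable (Spec_state_to_index state out) := by unfold Spec_state_to_index; infer_instance

-- ===== CLAIM (what is proved, stated in full; the proofs are below) =====
def Claim_equal_state_to_index : Prop := ∀ (state : List Int), Dom_state_to_index state → Pre_state_to_index state → Spec_state_to_index state (state_to_index state)

-- ===== LEMMAS AND PROOFS =====

/-- The mixed-radix value both programs compute: Σ l[i] * 10^i. -/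
def pvPoly : List Int → Int
  | [] => 0
  | x :: xs => x + 10 * pvPoly xs

theorem pvPoly_append (l : List Int) (x : Int) :
    pvPoly (l ++ [x]) = pvPoly l + x * 10 ^ l.length := by
  induction l with
  | nil => simp [pvPoly]
  | cons y ys ih => simp [pvPoly, ih]; ring

theorem pvHorner (l : List Int) :
    l.reverse.foldl (fun acc b => acc * 10 + b) 0 = pvPoly l := by
  rw [List.foldl_reverse]
  induction l with
  | nil => simp [pvPoly]
  | cons y ys ih => simp [pvPoly, ih]; ring

theorem pvSumA (l : List Int) :
    (PySem.List.pyRange 0 l.length 1).foldl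
      (fun idx i => idx + PySem.List.pyGetD l i 0 * 10 ^ i.toNat) 0 = pvPoly l := by
  induction l using List.reverseRecOn with
  | nil => simp [PySem.List.pyRange_one_eq_nil, pvPoly]
  | append_singleton ys x ih =>
    have hlen : ((ys ++ [x]).length : Int) = (ys.length : Int) + 1 := by simp
    rw [hlen, PySem.List.pyRange_one_succ_right (Int.natCast_nonneg _), List.foldl_append]
    have hcongr :
        (PySem.List.pyRange 0 ys.length 1).foldl
          (fun idx i => idx + PySem.List.pyGetD (ys ++ [x]) i 0 * 10 ^ i.toNat) 0 =
        (PySem.List.pyRange 0 ys.length 1).foldl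
          (fun idx i => idx + PySem.List.pyGetD ys i 0 * 10 ^ i.toNat) 0 := by
      apply PySem.List.foldl_congr_mem
      intro acc i hi
      have hmem := (PySem.List.mem_pyRange_one.mp hi)
      have h0 : 0 ≤ i := hmem.1
      have h1 : i < (ys.length : Int) := hmem.2
      rw [PySem.List.pyGetD_eq_getElem _ 0 h0 (by simp; omega),
          PySem.List.pyGetD_eq_getElem _ 0 h0 (by omega)]
      rw [List.getElem_append_left (by omega)]
    rw [hcongr, ih]
    simp only [List.foldl_cons, List.foldl_nil]
    rw [PySem.List.pyGetD_eq_getElem _ 0 (Int.natCast_nonneg _) (by simp)]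
    rw [pvPoly_append]
    simp [List.getElem_append_right]

-- ===== VERDICT (by name: the statement is the Claim_ definition above) =====
theorem state_to_index_spec : Claim_equal_state_to_index := by
  intro state _ _
  unfold Spec_state_to_index state_to_index state_to_index_alt
  simp only [PySem.List.slice_to_neg_one]
  rw [pvSumA, pvHorner]
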